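-- pv_equiv track=rewrite | github.com/thugdang/study-python | Bai100 Tr17.py | cach2
-- ===== SOURCE A (Python) =====
-- def cach2(n):
--     m = str(n)
--     tong = 0
--     tich = 1
--     max = 0
--     chan = 0
--     le = 0
--     for i in m:
--         if max < int(i):
--             max = int(i)
--         if int(i) % 2 == 0:
--             chan += 1
--         else:
--             le += 1
--         tong += int(i)
--         tich *= int(i)
--     return tong, tich, max, chan, le
-- ===== SOURCE B (Python) =====
-- def cach2(n):
--     # pure arithmetic recursion on n // 10: no string conversion at all
--     if n < 10:
--         return (n, n, n, 1 - n % 2, n % 2)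
--     t, p, mx, c, l = cach2(n // 10)
--     d = n % 10
--     return (t + d, p * d, max(mx, d), c + 1 - d % 2, l + d % 2)
-- ===== Notes on version B (the rewrite author's own statement) =====
-- stated objective: alternative
-- what changed: Replaces A's conversion to a string and single fused loop over its characters by a direct arithmetic recursion on n // 10 that extracts digits with divmod and combines the five statistics bottom-up, never building a string.
import Mathlib
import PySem

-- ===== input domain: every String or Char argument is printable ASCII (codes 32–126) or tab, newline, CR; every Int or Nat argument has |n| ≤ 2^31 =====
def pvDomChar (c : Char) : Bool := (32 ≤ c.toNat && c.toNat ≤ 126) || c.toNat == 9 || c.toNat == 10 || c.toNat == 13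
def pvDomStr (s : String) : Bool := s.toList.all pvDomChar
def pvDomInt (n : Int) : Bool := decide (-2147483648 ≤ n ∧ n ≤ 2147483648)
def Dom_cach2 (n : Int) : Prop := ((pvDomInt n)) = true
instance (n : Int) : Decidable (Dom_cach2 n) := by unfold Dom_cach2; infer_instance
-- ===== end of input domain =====

-- B replaces A's string conversion + fused character loop by an arithmetic recursion on n // 10; same cost, no string.

-- int(c) for a single decimal digit character (exact on digit chars; non-digit chars lie outside Pre_cach2)
def pvDigit (c : Char) : Int := (c.toNat : Int) - 48

-- ===== PORT A =====
def cach2Loop : List Char → Int × Int × Int × Int × Int → Int × Int × Int × Int × Int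
  | [], s => s
  | c :: cs, (tong, tich, mx, chan, le) =>
    let d := pvDigit c
    let mx' := if mx < d then d else mx
    let chan' := if PySem.Int.mod d 2 = 0 then chan + 1 else chan
    let le' := if PySem.Int.mod d 2 = 0 then le else le + 1
    cach2Loop cs (tong + d, tich * d, mx', chan', le')

def cach2 (n : Int) : Int × Int × Int × Int × Int :=
  cach2Loop (PySem.Int.toStr n).toList (0, 1, 0, 0, 0)

-- ===== PORT B =====
def cach2_alt (n : Int) : Int × Int × Int × Int × Int :=
  if h : n < 10 then (n, n, n, 1 - PySem.Int.mod n 2, PySem.Int.mod n 2)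
  else
    let r := cach2_alt (PySem.Int.floordiv n 10)
    let d := PySem.Int.mod n 10
    (r.1 + d, r.2.1 * d, max r.2.2.1 d, r.2.2.2.1 + 1 - PySem.Int.mod d 2, r.2.2.2.2 + PySem.Int.mod d 2)
termination_by n.toNat
decreasing_by
  rw [PySem.Int.floordiv_eq_ediv_of_pos (by omega)]
  omega

-- ===== PRECONDITION & SPEC =====
-- Pre_ excludes n < 0, on which Python's int('-') raises ValueError in A.
def Pre_cach2 (n : Int) : Prop := 0 ≤ n
instance (n : Int) : Decidable (Pre_cach2 n) := by unfold Pre_cach2; infer_instance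
def pvWitness_cach2 : Int := 125
def Spec_cach2 (n : Int) (out : Int × Int × Int × Int × Int) : Prop := out = cach2_alt n
instance (n : Int) (out : Int × Int × Int × Int × Int) : Decidable (Spec_cach2 n out) := by unfold Spec_cach2; infer_instance

-- ===== CLAIM (what is proved, stated in full; the proofs are below) =====
def Claim_equal_cach2 : Prop := ∀ (n : Int), Dom_cach2 n → Pre_cach2 n → Spec_cach2 n (cach2 n)

-- ===== LEMMAS AND PROOFS =====

-- digits of n (base 10, most significant first), by arithmetic recursion
def digitsRec (n : Nat) : List Char :=
  if n < 10 then [(n % 10).digitChar]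
  else digitsRec (n / 10) ++ [(n % 10).digitChar]
decreasing_by exact Nat.div_lt_self (by omega) (by omega)

lemma toDigitsCore_digits (f : Nat) : ∀ (n : Nat) (ds : List Char), n < f →
    Nat.toDigitsCore 10 f n ds = digitsRec n ++ ds := by
  induction f with
  | zero => intro n ds h; omega
  | succ f ih =>
    intro n ds h
    rw [Nat.toDigitsCore]
    by_cases h10 : n < 10
    · have h0 : n / 10 = 0 := by omega
      rw [digitsRec]
      simp only [h0, h10, List.singleton_append, if_pos]
    · have hne : ¬ (n / 10 = 0) := by omega
      have hlt : n / 10 < f := by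
        have := Nat.div_lt_self (n := n) (by omega) (by omega : 1 < 10)
        omega
      simp only [hne, if_false]
      rw [ih (n / 10) _ hlt]
      conv_rhs => rw [digitsRec]
      simp [h10]

lemma toDigits_eq (n : Nat) : Nat.toDigits 10 n = digitsRec n := by
  rw [Nat.toDigits, toDigitsCore_digits (n + 1) n [] (by omega)]
  simp

lemma cach2Loop_append (l1 l2 : List Char) : ∀ s, cach2Loop (l1 ++ l2) s = cach2Loop l2 (cach2Loop l1 s) := by
  induction l1 with
  | nil => intro s; simp [cach2Loop]
  | cons c cs ih =>
    intro s
    obtain ⟨t, p, mx, ch, le⟩ := s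
    simp [cach2Loop, ih]

lemma pvDigit_digitChar (r : Nat) (h : r < 10) : pvDigit r.digitChar = (r : Int) := by
  interval_cases r <;> decide

lemma cach2_main (n : Nat) : cach2Loop (digitsRec n) (0, 1, 0, 0, 0) = cach2_alt (n : Int) := by
  induction n using Nat.strong_induction_on with
  | _ n ih =>
    by_cases h10 : n < 10
    · interval_cases n <;> (rw [digitsRec, cach2_alt]) <;> decide
    · have hlt : n / 10 < n := Nat.div_lt_self (by omega) (by omega)
      rw [digitsRec]
      simp only [h10, if_false]
      rw [cach2Loop_append, ih (n / 10) hlt]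
      conv_rhs => rw [cach2_alt]
      have hn10 : ¬ ((n : Int) < 10) := by exact_mod_cast h10
      rw [dif_neg hn10]
      rw [show PySem.Int.floordiv ((n : Nat) : Int) 10 = ((n / 10 : Nat) : Int) from by
            exact_mod_cast PySem.Int.floordiv_natCast n 10,
          show PySem.Int.mod ((n : Nat) : Int) 10 = ((n % 10 : Nat) : Int) from by
            exact_mod_cast PySem.Int.mod_natCast n 10]
      obtain ⟨t, p, mx, ch, le⟩ := cach2_alt ((n / 10 : Nat) : Int)
      have hr : n % 10 < 10 := Nat.mod_lt _ (by omega)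
      simp only [cach2Loop, pvDigit_digitChar _ hr]
      rw [show PySem.Int.mod (((n % 10 : Nat)) : Int) 2 = ((n % 10 % 2 : Nat) : Int) from by
            exact_mod_cast PySem.Int.mod_natCast (n % 10) 2]
      have hmax : (if mx < ((n % 10 : Nat) : Int) then ((n % 10 : Nat) : Int) else mx)
          = max mx ((n % 10 : Nat) : Int) := by
        rcases lt_or_ge mx ((n % 10 : Nat) : Int) with h | h
        · rw [if_pos h, max_eq_right h.le]
        · rw [if_neg (not_lt.mpr h), max_eq_left h]
      rcases Nat.mod_two_eq_zero_or_one (n % 10) with hp | hp <;>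
        rw [hp] <;>
        simp only [Nat.cast_zero, Nat.cast_one, hmax] <;>
        norm_num

-- ===== VERDICT (by name: the statement is the Claim_ definition above) =====
theorem cach2_spec : Claim_equal_cach2 := by
  intro n _ hn
  unfold Pre_cach2 at hn
  unfold Spec_cach2 cach2
  rw [show (PySem.Int.toStr n).toList = PySem.Int.toChars n from PySem.Int.toList_toStr n]
  unfold PySem.Int.toChars
  rw [if_neg (by omega : ¬ n < 0), toDigits_eq, cach2_main]
  rw [Int.toNat_of_nonneg hn]
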